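-- pv_equiv track=rewrite | github.com/ramazanarslan/NLP-Information-Retrieve-cmpe492 | neuroextractor/views.py | powerset_ofindexvalues_filterconsecutive
-- ===== SOURCE A (Python) =====
-- from itertools import chain, combinations
--
-- def powerset_ofindexvalues_filterconsecutive(indexlength):
--     result = []
--
--     indices = range(indexlength)
--     indices_powerset = list(powerset(indices))
--     indices_powerset.remove(())
--
--     for subset in indices_powerset:
--         subset_consecutive = True
--
--         prevelement = subset[0]
--         for currentelement in subset[1:]:
--             if( currentelement-prevelement == 1):
--                 pass
--             else:
--                 subset_consecutive = False
--             prevelement = currentelement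
--         if(subset_consecutive):
--             result.append(subset)
--
--     return result
--
-- def powerset(iterable):
--     """
--     powerset([1,2,3]) --> () (1,) (2,) (3,) (1,2) (1,3) (2,3) (1,2,3)
--     """
--     xs = list(iterable)
--     # note we return an iterator rather than a list
--     return chain.from_iterable(combinations(xs, n) for n in range(len(xs) + 1))
-- ===== SOURCE B (Python) =====
-- def powerset_ofindexvalues_filterconsecutive(indexlength):
--     # Directly emit the contiguous runs by length then start, instead of
--     # filtering the full powerset: O(n^3) output construction vs O(2^n * n).
--     n = max(indexlength, 0)
--     return [tuple(range(i, i + k)) for k in range(1, n + 1) for i in range(n - k + 1)]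
-- ===== Notes on version B (the rewrite author's own statement) =====
-- stated objective: faster
-- what changed: B emits the contiguous runs (i..i+k-1) directly by length then start index, instead of generating the whole powerset and filtering non-consecutive subsets.
import Mathlib
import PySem

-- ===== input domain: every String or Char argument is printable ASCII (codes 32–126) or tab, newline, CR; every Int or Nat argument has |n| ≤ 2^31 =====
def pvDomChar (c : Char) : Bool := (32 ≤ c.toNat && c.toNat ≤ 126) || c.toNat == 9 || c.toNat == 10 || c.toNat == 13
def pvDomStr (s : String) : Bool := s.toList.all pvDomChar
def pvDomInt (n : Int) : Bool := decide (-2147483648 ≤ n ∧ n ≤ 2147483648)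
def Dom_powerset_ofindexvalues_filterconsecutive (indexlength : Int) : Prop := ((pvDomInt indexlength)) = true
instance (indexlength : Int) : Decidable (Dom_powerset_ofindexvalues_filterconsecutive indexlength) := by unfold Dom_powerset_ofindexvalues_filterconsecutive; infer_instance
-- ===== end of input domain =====

-- B replaces A's generate-the-whole-powerset-and-filter with a direct emission of the
-- contiguous runs (i..i+k-1) by length then start index (objective: faster, asymptotic).

-- ===== PORT A =====
-- helper `powerset` of A, via itertools.combinations in lexicographic order
def pvCombos : List Int → Nat → List (List Int)
  | _, 0 => [[]]
  | [], _ + 1 => []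
  | x :: rest, k + 1 => (pvCombos rest k).map (x :: ·) ++ pvCombos rest (k + 1)

-- A's inner loop: prevelement = subset[0]; for currentelement in subset[1:]: …
-- (A only ever applies it to non-empty subsets, since () was removed)
def pvACheck (subset : List Int) : Bool :=
  match subset with
  | [] => true
  | p :: rest =>
    (rest.foldl (fun (st : Bool × Int) cur =>
        (if cur - st.2 = 1 then st.1 else false, cur)) (true, p)).1

def powerset_ofindexvalues_filterconsecutive (indexlength : Int) : List (List Int) :=
  let indices := PySem.List.pyRange 0 indexlength 1
  let indices_powerset := (List.range (indices.length + 1)).flatMap (fun n => pvCombos indices n)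
  -- indices_powerset.remove(()): () is always present, so remove? is always `some`
  let pruned := (PySem.List.remove? indices_powerset []).getD indices_powerset
  pruned.foldl (fun result subset =>
    if pvACheck subset then result ++ [subset] else result) []

-- ===== PORT B =====
def powerset_ofindexvalues_filterconsecutive_alt (indexlength : Int) : List (List Int) :=
  let n : Int := max indexlength 0
  (PySem.List.pyRange 1 (n + 1) 1).flatMap (fun k =>
    (PySem.List.pyRange 0 (n - k + 1) 1).map (fun i => PySem.List.pyRange i (i + k) 1))

-- ===== PRECONDITION & SPEC =====
def Spec_powerset_ofindexvalues_filterconsecutive (indexlength : Int) (out : List (List Int)) : Prop := out = powerset_ofindexvalues_filterconsecutive_alt indexlength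
instance (indexlength : Int) (out : List (List Int)) : Decidable (Spec_powerset_ofindexvalues_filterconsecutive indexlength out) := by unfold Spec_powerset_ofindexvalues_filterconsecutive; infer_instance

-- ===== CLAIM (what is proved, stated in full; the proofs are below) =====
def Claim_equal_powerset_ofindexvalues_filterconsecutive : Prop := ∀ (indexlength : Int), Dom_powerset_ofindexvalues_filterconsecutive indexlength → Spec_powerset_ofindexvalues_filterconsecutive indexlength (powerset_ofindexvalues_filterconsecutive indexlength)

-- ===== LEMMAS AND PROOFS =====

-- [r, r+1, …, r+m-1]
def pvRunL (r : Int) (m : Nat) : List Int := (List.range m).map (fun j : Nat => r + (j : Int))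

-- "all adjacent differences from p onward are 1", as a structural recursion
def pvChk : Int → List Int → Bool
  | _, [] => true
  | p, c :: cs => (decide (c - p = 1)) && pvChk c cs

theorem pvFold_chk (rest : List Int) : ∀ (b : Bool) (p : Int),
    (rest.foldl (fun (st : Bool × Int) cur =>
        (if cur - st.2 = 1 then st.1 else false, cur)) (b, p)).1 = (b && pvChk p rest) := by
  induction rest with
  | nil => intro b p; simp [pvChk]
  | cons c cs ih =>
    intro b p
    rw [List.foldl_cons, ih]
    by_cases h : c - p = 1 <;> simp [pvChk, h]

theorem pvACheck_cons (p : Int) (rest : List Int) :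
    pvACheck (p :: rest) = pvChk p rest := by
  rw [show pvACheck (p :: rest) = (rest.foldl (fun (st : Bool × Int) cur =>
        (if cur - st.2 = 1 then st.1 else false, cur)) (true, p)).1 from rfl, pvFold_chk]
  simp

theorem pvRunL_zero (r : Int) : pvRunL r 0 = [] := by simp [pvRunL]

theorem pvRunL_succ (r : Int) (m : Nat) : pvRunL r (m + 1) = r :: pvRunL (r + 1) m := by
  simp only [pvRunL, List.range_succ_eq_map, List.map_cons, List.map_map, Nat.cast_zero,
    add_zero, List.cons.injEq, true_and]
  exact List.map_congr_left fun j _ => by simp only [Function.comp_apply]; push_cast; ring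

theorem pvCombos_zero (xs : List Int) : pvCombos xs 0 = [[]] := by
  cases xs <;> rfl

-- no consecutive-from-p subset starts strictly beyond p+1
theorem pvG0 (m : Nat) : ∀ (q p : Int) (k : Nat), p + 1 < q →
    List.filter (fun c => pvChk p c) (pvCombos (pvRunL q m) (k + 1)) = [] := by
  induction m with
  | zero => intro q p k _; simp [pvRunL_zero, pvCombos]
  | succ m ih =>
    intro q p k hq
    rw [pvRunL_succ]
    simp only [pvCombos, List.filter_append, List.filter_map]
    have h1 : (fun c => pvChk p c) ∘ (q :: ·) = fun _ => false := by
      funext c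
      simp [pvChk, show ¬(q - p = 1) by omega]
    rw [h1, ih (q + 1) p k (by omega)]
    simp

-- exactly one consecutive-from-p j-subset of the run starting at p+1, when it fits
theorem pvG (m : Nat) : ∀ (p : Int) (j : Nat),
    List.filter (fun c => pvChk p c) (pvCombos (pvRunL (p + 1) m) j) =
      if j ≤ m then [pvRunL (p + 1) j] else [] := by
  induction m with
  | zero =>
    intro p j
    cases j with
    | zero => simp [pvRunL_zero, pvCombos_zero, pvChk]
    | succ j => simp [pvRunL_zero, pvCombos]
  | succ m ih =>
    intro p j
    cases j with
    | zero => simp [pvCombos_zero, pvChk, pvRunL_zero]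
    | succ i =>
      rw [pvRunL_succ]
      simp only [pvCombos, List.filter_append, List.filter_map]
      have h1 : (fun c => pvChk p c) ∘ ((p + 1) :: ·) = fun c => pvChk (p + 1) c := by
        funext c; simp [pvChk]
      rw [h1, ih (p + 1) i, pvG0 m (p + 1 + 1) p i (by omega)]
      by_cases h : i ≤ m
      · simp [h, show i + 1 ≤ m + 1 by omega, pvRunL_succ]
      · simp [h, show ¬(i + 1 ≤ m + 1) by omega]

-- main characterisation: the consecutive (j+1)-subsets of the run r..r+m-1 are
-- the runs of length j+1 starting at r, r+1, …, in order
theorem pvM (m : Nat) : ∀ (r : Int) (j : Nat),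
    List.filter pvACheck (pvCombos (pvRunL r m) (j + 1)) =
      (List.range (m - j)).map (fun i : Nat => pvRunL (r + (i : Int)) (j + 1)) := by
  induction m with
  | zero => intro r j; simp [pvRunL_zero, pvCombos]
  | succ m ih =>
    intro r j
    rw [pvRunL_succ]
    simp only [pvCombos, List.filter_append, List.filter_map]
    have h1 : pvACheck ∘ (r :: ·) = fun c => pvChk r c := by
      funext c; simp [pvACheck_cons, Function.comp]
    rw [h1, pvG m r j, ih (r + 1) j]
    by_cases h : j ≤ m
    · have hm : m + 1 - j = (m - j) + 1 := by omega
      rw [if_pos h, hm, List.range_succ_eq_map]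
      simp only [List.map_cons, List.map_nil, List.map_map, List.cons_append, List.nil_append,
        Nat.cast_zero, add_zero, List.cons.injEq]
      exact ⟨(pvRunL_succ r j).symm,
        List.map_congr_left fun i _ => by simp only [Function.comp_apply]; push_cast; ring_nf⟩
    · have hm : m + 1 - j = 0 := by omega
      have hm2 : m - j = 0 := by omega
      simp [h, hm, hm2]

-- the common canonical form
def pvCanon (N : Nat) : List (List Int) :=
  (List.range N).flatMap (fun j : Nat =>
    (List.range (N - j)).map (fun i : Nat => pvRunL ((i : Int)) (j + 1)))

theorem pvA_eq_canon (il : Int) :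
    powerset_ofindexvalues_filterconsecutive il = pvCanon il.toNat := by
  have hind : PySem.List.pyRange 0 il 1 = pvRunL 0 il.toNat := by
    rw [PySem.List.pyRange_one]
    simp only [Int.sub_zero, pvRunL]
  have hlen : (pvRunL 0 il.toNat).length = il.toNat := by simp [pvRunL]
  unfold powerset_ofindexvalues_filterconsecutive
  rw [hind]
  dsimp only
  rw [hlen, List.range_succ_eq_map, List.flatMap_cons, pvCombos_zero,
      List.flatMap_map]
  simp only [List.singleton_append]
  rw [PySem.List.remove?_cons_self]
  simp only [Option.getD_some]
  rw [PySem.List.foldl_append_if_eq_filter, List.nil_append, List.filter_flatMap]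
  unfold pvCanon
  refine List.flatMap_congr (fun j _ => ?_)
  simp only [Nat.succ_eq_add_one]
  rw [pvM il.toNat 0 j]
  exact List.map_congr_left fun i _ => by rw [zero_add]

theorem pvB_eq_canon (il : Int) :
    powerset_ofindexvalues_filterconsecutive_alt il = pvCanon il.toNat := by
  have key : ∀ N : Nat,
      (PySem.List.pyRange 1 ((N : Int) + 1) 1).flatMap (fun k =>
        (PySem.List.pyRange 0 ((N : Int) - k + 1) 1).map
          (fun i => PySem.List.pyRange i (i + k) 1)) = pvCanon N := by
    intro N
    have h1 : PySem.List.pyRange 1 ((N : Int) + 1) 1 =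
        (List.range N).map (fun k : Nat => 1 + (k : Int)) := by
      rw [PySem.List.pyRange_one, show ((N : Int) + 1 - 1).toNat = N by omega]
    rw [h1, List.flatMap_map]
    unfold pvCanon
    refine List.flatMap_congr (fun j _ => ?_)
    have h2 : PySem.List.pyRange 0 ((N : Int) - (1 + (j : Int)) + 1) 1 =
        (List.range (N - j)).map (fun i : Nat => (0 : Int) + (i : Int)) := by
      rw [PySem.List.pyRange_one, Int.sub_zero,
        show ((N : Int) - (1 + (j : Int)) + 1).toNat = N - j by omega]
    rw [h2, List.map_map]
    refine List.map_congr_left fun i _ => ?_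
    simp only [Function.comp_apply, zero_add]
    rw [PySem.List.pyRange_one, show ((i : Int) + (1 + (j : Int)) - (i : Int)).toNat = j + 1 by omega]
    rfl
  unfold powerset_ofindexvalues_filterconsecutive_alt
  dsimp only
  rw [← Int.toNat_eq_max]
  exact key il.toNat

-- ===== VERDICT (by name: the statement is the Claim_ definition above) =====
theorem powerset_ofindexvalues_filterconsecutive_spec : Claim_equal_powerset_ofindexvalues_filterconsecutive := by
  intro il _
  unfold Spec_powerset_ofindexvalues_filterconsecutive
  rw [pvA_eq_canon, pvB_eq_canon]
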